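-- pv_equiv track=rewrite | github.com/MaximumBeings/GoogleCodingInterviewQuestions | matrixRotateByK.py | matrixRotateByK
-- ===== SOURCE A (Python) =====
-- def matrixRotateByK(input,k):
--     for i in range(k):
--         temp_1 = [row[i] for row in input]
--         temp_2 = [row[i+1] for row in input]
--         for x in range(len(input)):
--             input[x][i] = temp_2[x]
--         for x in range(len(input)):
--             input[x][i+1] = temp_1[x]
--     return input
-- ===== SOURCE B (Python) =====
-- def matrixRotateByK(input, k):
--     if k > 0:
--         for row in input:
--             first = row[0]
--             for i in range(k):
--                 row[i] = row[i + 1]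
--             row[k] = first
--     return input
-- ===== Notes on version B (the rewrite author's own statement) =====
-- stated objective: simpler
-- what changed: B rotates the first k+1 entries of each row directly (one left-shift per row, each cell written once) instead of A's k column-wise adjacent swaps with two temporary column arrays (each cell written twice, column-major).
import Mathlib
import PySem

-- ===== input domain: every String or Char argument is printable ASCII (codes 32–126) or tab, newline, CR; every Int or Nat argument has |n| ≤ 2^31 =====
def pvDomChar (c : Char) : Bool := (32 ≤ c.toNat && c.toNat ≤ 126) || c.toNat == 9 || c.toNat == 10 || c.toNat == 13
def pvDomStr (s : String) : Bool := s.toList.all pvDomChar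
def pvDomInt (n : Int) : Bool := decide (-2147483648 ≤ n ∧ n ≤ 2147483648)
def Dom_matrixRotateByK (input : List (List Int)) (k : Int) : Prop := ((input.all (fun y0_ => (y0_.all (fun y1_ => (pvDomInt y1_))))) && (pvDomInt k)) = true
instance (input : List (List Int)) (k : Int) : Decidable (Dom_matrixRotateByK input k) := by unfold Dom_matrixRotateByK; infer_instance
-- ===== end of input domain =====

-- B left-rotates the first k+1 entries of each row in one row-major pass instead of A's k
-- column-wise adjacent swaps with temporary column arrays; both Pythons mutate `input`
-- in place, and the theorems here are about the RETURN value only.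

-- ===== PORT A =====
def matrixRotateByK (input : List (List Int)) (k : Int) : List (List Int) :=
  (PySem.List.pyRange 0 k 1).foldl (fun inp i =>
    let temp1 := inp.map (fun row => PySem.List.pyGetD row i 0)
    let temp2 := inp.map (fun row => PySem.List.pyGetD row (i + 1) 0)
    let inp1 := (PySem.List.pyRange 0 (inp.length : Int) 1).foldl
      (fun acc x => acc.set x.toNat ((acc.getD x.toNat []).set i.toNat (temp2.getD x.toNat 0))) inp
    (PySem.List.pyRange 0 (inp1.length : Int) 1).foldl
      (fun acc x => acc.set x.toNat ((acc.getD x.toNat []).set (i + 1).toNat (temp1.getD x.toNat 0))) inp1)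
    input

-- ===== PORT B =====
def matrixRotateByK_alt (input : List (List Int)) (k : Int) : List (List Int) :=
  if 0 < k then
    input.map (fun row =>
      let first := PySem.List.pyGetD row 0 0
      let row' := (PySem.List.pyRange 0 k 1).foldl
        (fun r i => r.set i.toNat (PySem.List.pyGetD r (i + 1) 0)) row
      row'.set k.toNat first)
  else input

-- ===== PRECONDITION & SPEC =====
-- Pre_ excludes exactly the inputs where A raises IndexError: k > 0 with some row
-- shorter than k+1 (A reads row[i] and row[i+1] for i up to k-1 in every row).
def Pre_matrixRotateByK (input : List (List Int)) (k : Int) : Prop :=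
  0 < k → ∀ row ∈ input, k + 1 ≤ (row.length : Int)
instance (input : List (List Int)) (k : Int) : Decidable (Pre_matrixRotateByK input k) := by
  unfold Pre_matrixRotateByK; infer_instance

def pvWitness_matrixRotateByK : List (List Int) × Int := ([[1, 2, 3], [4, 5, 6]], 2)

def Spec_matrixRotateByK (input : List (List Int)) (k : Int) (out : List (List Int)) : Prop := out = matrixRotateByK_alt input k
instance (input : List (List Int)) (k : Int) (out : List (List Int)) : Decidable (Spec_matrixRotateByK input k out) := by unfold Spec_matrixRotateByK; infer_instance

-- ===== CLAIM (what is proved, stated in full; the proofs are below) =====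
def Claim_equal_matrixRotateByK : Prop := ∀ (input : List (List Int)) (k : Int), Dom_matrixRotateByK input k → Pre_matrixRotateByK input k → Spec_matrixRotateByK input k (matrixRotateByK input k)

-- ===== LEMMAS AND PROOFS =====

-- the per-row effect of one of A's column swaps (reads come from the original row, as A's temps do)
def pvSwapRow (i : Nat) (r : List Int) : List Int :=
  (r.set i (r.getD (i + 1) 0)).set (i + 1) (r.getD i 0)

lemma pv_getD_set (l : List Int) (i : Nat) (v : Int) (j : Nat) :
    (l.set i v).getD j 0 = if j = i ∧ j < l.length then v else l.getD j 0 := by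
  simp [List.getD_eq_getElem?_getD, List.getElem?_set]
  split_ifs with h1 h2 h3 <;> try omega
  all_goals simp_all

-- an ascending index loop writing each position once is a mapIdx
lemma pv_foldl_set_eq_mapIdx {α : Type} (d : α) (g : Nat → α → α) (l : List α) (n : Nat)
    (hn : n ≤ l.length) :
    (List.range n).foldl (fun acc x => acc.set x (g x (acc.getD x d))) l
      = l.mapIdx (fun x r => if x < n then g x r else r) := by
  induction n with
  | zero =>
    simp
    apply List.ext_getElem (by simp); intro j h1 h2; simp
  | succ n ih =>
    rw [List.range_succ, List.foldl_append, ih (by omega)]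
    simp only [List.foldl_cons, List.foldl_nil]
    have hn' : n < l.length := by omega
    have hget : (l.mapIdx (fun x r => if x < n then g x r else r)).getD n d = l[n] := by
      rw [List.getD_eq_getElem _ _ (by simpa using hn')]
      simp
    rw [hget]
    apply List.ext_getElem (by simp)
    intro j h1 h2
    by_cases hj : j = n
    · subst hj
      rw [List.getElem_set_self (by simpa using hn')]
      simp
    · rw [List.getElem_set_ne (by omega)]
      simp only [List.getElem_mapIdx]
      have hj2 : j < l.length := by simpa using h1
      by_cases hlt : j < n
      · simp [hlt, show j < n + 1 by omega]
      · simp [hlt, show ¬ j < n + 1 by omega]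

-- one inner index loop of A (over rows already transformed by s) acts rowwise
lemma pv_setloop (inp : List (List Int)) (s : List Int → List Int) (f : List Int → Int) (p : Nat)
    (l : List (List Int)) (hl : l = inp.map s) (n : Nat) (hn : n = inp.length) :
    ((List.range n).foldl
        (fun acc x => acc.set x ((acc.getD x []).set p ((inp.map f).getD x 0))) l)
      = inp.map (fun r => (s r).set p (f r)) := by
  subst hl hn
  rw [show inp.length = (inp.map s).length by simp,
      pv_foldl_set_eq_mapIdx [] (fun x r => r.set p ((inp.map f).getD x 0)) (inp.map s) _ le_rfl]
  apply List.ext_getElem (by simp)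
  intro j h1 h2
  simp only [List.getElem_mapIdx, List.getElem_map]
  have hj : j < inp.length := by simpa using h2
  rw [List.getD_eq_getElem _ _ (by simpa using hj)]
  simp [hj]

-- an outer loop of rowwise maps is a map of row loops
lemma pv_foldl_map (inp : List (List Int)) (L : List Nat) (s : Nat → List Int → List Int) :
    L.foldl (fun m i => m.map (s i)) inp = inp.map (fun r => L.foldl (fun r i => s i r) r) := by
  induction L generalizing inp with
  | nil => simp
  | cons a L ih => simp [ih, Function.comp]

-- one iteration of A's outer loop acts rowwise as pvSwapRow
lemma pv_stepA (inp : List (List Int)) (t : Nat) :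
    (let temp1 := inp.map (fun row => PySem.List.pyGetD row (t : Int) 0)
     let temp2 := inp.map (fun row => PySem.List.pyGetD row ((t : Int) + 1) 0)
     let inp1 := (PySem.List.pyRange 0 (inp.length : Int) 1).foldl
       (fun acc x => acc.set x.toNat ((acc.getD x.toNat []).set (t : Int).toNat (temp2.getD x.toNat 0))) inp
     (PySem.List.pyRange 0 (inp1.length : Int) 1).foldl
       (fun acc x => acc.set x.toNat ((acc.getD x.toNat []).set ((t : Int) + 1).toNat (temp1.getD x.toNat 0))) inp1)
      = inp.map (pvSwapRow t) := by
  have hc : ((t : Int) + 1) = ((t + 1 : Nat) : Int) := by push_cast; ring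
  simp only [hc, PySem.List.pyGetD_natCast, Int.toNat_natCast]
  rw [PySem.List.pyRange_one]
  simp only [Int.sub_zero, zero_add, Int.toNat_natCast, List.foldl_map]
  rw [pv_setloop inp id (fun r => r.getD (t + 1) 0) t inp (List.map_id inp).symm inp.length rfl]
  rw [PySem.List.pyRange_one]
  simp only [Int.sub_zero, zero_add, Int.toNat_natCast, List.foldl_map]
  rw [pv_setloop inp (fun r => (id r).set t (r.getD (t + 1) 0)) (fun r => r.getD t 0) (t + 1)
        _ rfl _ (by simp)]
  simp [pvSwapRow]

-- A as a rowwise map of its swap loop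
lemma pv_portA_eq (input : List (List Int)) (k : Int) :
    matrixRotateByK input k
      = input.map (fun row => (List.range k.toNat).foldl (fun r i => pvSwapRow i r) row) := by
  unfold matrixRotateByK
  rw [PySem.List.pyRange_one]
  simp only [Int.sub_zero, zero_add, List.foldl_map]
  simp only [pv_stepA]
  exact pv_foldl_map input (List.range k.toNat) pvSwapRow

-- B as a rowwise map of its shift loop, in Nat indices
lemma pv_portB_eq (input : List (List Int)) (k : Int) (hk : 0 < k) :
    matrixRotateByK_alt input k
      = input.map (fun row =>
          ((List.range k.toNat).foldl (fun r i => r.set i (r.getD (i + 1) 0)) row).set k.toNat (row.getD 0 0)) := by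
  unfold matrixRotateByK_alt
  rw [if_pos hk, PySem.List.pyRange_one]
  simp only [Int.sub_zero, zero_add, List.foldl_map]
  apply List.map_congr_left
  intro row _
  have hc : ∀ t : Nat, ((t : Int) + 1) = ((t + 1 : Nat) : Int) := by intro t; push_cast; ring
  simp only [hc, PySem.List.pyGetD_natCast, Int.toNat_natCast]
  rw [show ((0 : Int) = ((0 : Nat) : Int)) from rfl, PySem.List.pyGetD_natCast]

lemma pv_lenA (m : Nat) (row : List Int) :
    ((List.range m).foldl (fun r i => pvSwapRow i r) row).length = row.length := by
  induction m with
  | zero => simp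
  | succ n ih =>
    rw [List.range_succ, List.foldl_append]
    simp only [List.foldl_cons, List.foldl_nil, pvSwapRow, List.length_set]
    exact ih

-- after m adjacent swaps: entry j is row[j+1] for j < m, row[0] at j = m, row[j] beyond
lemma pv_getA (m : Nat) (row : List Int) :
    m < row.length → ∀ j : Nat,
    ((List.range m).foldl (fun r i => pvSwapRow i r) row).getD j 0
      = if j < m then row.getD (j + 1) 0 else if j = m then row.getD 0 0 else row.getD j 0 := by
  induction m with
  | zero =>
    intro _ j
    simp only [List.range_zero, List.foldl_nil, Nat.not_lt_zero, if_false]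
    split_ifs with h
    · subst h; rfl
    · rfl
  | succ n ih =>
    intro hm j
    rw [List.range_succ, List.foldl_append]
    simp only [List.foldl_cons, List.foldl_nil]
    set X := (List.range n).foldl (fun r i => pvSwapRow i r) row with hX
    have hlen : X.length = row.length := pv_lenA n row
    have ihn := ih (by omega)
    simp only [pvSwapRow, pv_getD_set, List.length_set, hlen, ihn]
    split_ifs <;> first
      | rfl
      | omega
      | (congr 1; omega)

lemma pv_lenG (m : Nat) (row : List Int) :
    ((List.range m).foldl (fun r i => r.set i (r.getD (i + 1) 0)) row).length = row.length := by
  induction m with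
  | zero => simp
  | succ n ih =>
    rw [List.range_succ, List.foldl_append]
    simp only [List.foldl_cons, List.foldl_nil, List.length_set]
    exact ih

-- after B's shift loop: entry j is row[j+1] for j < m, row[j] beyond
lemma pv_getG (m : Nat) (row : List Int) : ∀ j : Nat,
    ((List.range m).foldl (fun r i => r.set i (r.getD (i + 1) 0)) row).getD j 0
      = if j < m then row.getD (j + 1) 0 else row.getD j 0 := by
  induction m with
  | zero => intro j; simp
  | succ n ih =>
    intro j
    rw [List.range_succ, List.foldl_append]
    simp only [List.foldl_cons, List.foldl_nil]
    rw [pv_getD_set, ih (n + 1), ih j, pv_lenG]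
    have hd : ∀ a : Nat, row.length ≤ a → row.getD a 0 = 0 := fun a ha => List.getD_eq_default _ _ ha
    split_ifs <;> first
      | rfl
      | omega
      | (congr 1; omega)
      | (rw [hd _ (by omega), hd _ (by omega)])

-- per-row equality of the two algorithms on a long-enough row
lemma pv_row_eq (m : Nat) (row : List Int) (hm : m < row.length) :
    (List.range m).foldl (fun r i => pvSwapRow i r) row
      = ((List.range m).foldl (fun r i => r.set i (r.getD (i + 1) 0)) row).set m (row.getD 0 0) := by
  apply List.ext_getElem (by rw [pv_lenA, List.length_set, pv_lenG])
  intro j h1 h2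
  rw [← List.getD_eq_getElem _ _ h1, ← List.getD_eq_getElem _ _ h2,
      pv_getA m row hm j, pv_getD_set, pv_lenG, pv_getG]
  split_ifs <;> first
    | rfl
    | omega

-- ===== VERDICT (by name: the statement is the Claim_ definition above) =====
theorem matrixRotateByK_spec : Claim_equal_matrixRotateByK := by
  intro input k _ hpre
  unfold Spec_matrixRotateByK
  by_cases hk : 0 < k
  · rw [pv_portA_eq, pv_portB_eq input k hk]
    apply List.map_congr_left
    intro row hrow
    have hlen : k + 1 ≤ (row.length : Int) := hpre hk row hrow
    exact pv_row_eq k.toNat row (by omega)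
  · unfold matrixRotateByK matrixRotateByK_alt
    rw [PySem.List.pyRange_one_eq_nil (by omega), if_neg hk]
    rfl
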